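-- pv_equiv track=rewrite | github.com/abbasmoosajee07/AdventofCode | 2022/24/2022Day24.py | calculate_bad_cells
-- ===== SOURCE A (Python) =====
-- def calculate_bad_cells(grid_map, rows, cols):
--     """
--     Calculate the 'bad' cells where blizzards are present for each time step.
--     """
--     BAD_CELLS = {}
--
--     # Precompute bad cells at each time step
--     for storm in range((rows - 2) * (cols - 2) + 1):
--         BAD = set()
--         for r in range(rows):
--             for c in range(cols):
--                 if grid_map[r][c] == '>':
--                     BAD.add((r, 1 + ((c - 1 + storm) % (cols - 2))))  # Move right
--                 elif grid_map[r][c] == 'v':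
--                     BAD.add((1 + ((r - 1 + storm) % (rows - 2)), c))  # Move down
--                 elif grid_map[r][c] == '<':
--                     BAD.add((r, 1 + ((c - 1 - storm) % (cols - 2))))  # Move left
--                 elif grid_map[r][c] == '^':
--                     BAD.add((1 + ((r - 1 - storm) % (rows - 2)), c))  # Move up
--         BAD_CELLS[storm] = BAD
--
--     return BAD_CELLS
-- ===== SOURCE B (Python) =====
-- def calculate_bad_cells(grid_map, rows, cols):
--     """
--     Calculate the 'bad' cells where blizzards are present for each time step.
--     One pass collects the blizzards; each time step then scans only that index.
--     """
--     blizzards = []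
--     for r in range(min(rows, len(grid_map))):
--         row = grid_map[r]
--         for c in range(min(cols, len(row))):
--             ch = row[c]
--             if ch == '>' or ch == '<' or ch == 'v' or ch == '^':
--                 blizzards.append((r, c, ch))
--
--     BAD_CELLS = {}
--     for storm in range((rows - 2) * (cols - 2) + 1):
--         BAD = set()
--         for r, c, ch in blizzards:
--             if ch == '>':
--                 BAD.add((r, 1 + ((c - 1 + storm) % (cols - 2))))
--             elif ch == 'v':
--                 BAD.add((1 + ((r - 1 + storm) % (rows - 2)), c))
--             elif ch == '<':
--                 BAD.add((r, 1 + ((c - 1 - storm) % (cols - 2))))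
--             else:
--                 BAD.add((1 + ((r - 1 - storm) % (rows - 2)), c))
--         BAD_CELLS[storm] = BAD
--     return BAD_CELLS
-- ===== Notes on version B (the rewrite author's own statement) =====
-- stated objective: alternative
-- what changed: B scans the grid once to build a list of blizzards (r, c, char) and then, for each time step, iterates only over that list applying the same modular shifts, instead of A's full rows*cols grid rescan at every time step.
import Mathlib
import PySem

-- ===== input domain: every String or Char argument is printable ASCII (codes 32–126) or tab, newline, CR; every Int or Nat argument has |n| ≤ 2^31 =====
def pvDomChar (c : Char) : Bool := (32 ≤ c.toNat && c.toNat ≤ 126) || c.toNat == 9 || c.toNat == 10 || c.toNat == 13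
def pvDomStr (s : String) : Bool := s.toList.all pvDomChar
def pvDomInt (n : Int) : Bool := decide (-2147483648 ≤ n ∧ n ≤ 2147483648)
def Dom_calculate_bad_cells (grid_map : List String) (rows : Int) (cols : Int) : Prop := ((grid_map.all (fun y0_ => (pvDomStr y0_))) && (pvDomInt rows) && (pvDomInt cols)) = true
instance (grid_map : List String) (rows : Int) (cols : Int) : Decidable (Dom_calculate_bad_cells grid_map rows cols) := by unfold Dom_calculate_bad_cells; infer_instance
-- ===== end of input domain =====

-- B replaces A's per-time-step full-grid rescan by a one-pass blizzard index scanned per step; equivalence is about the return value only.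

-- ===== PORT A =====
-- grid_map[r][c] (raises on out-of-range in Python; none here, excluded by Pre_)
def pvCell (grid_map : List String) (r c : Int) : Option Char :=
  (PySem.List.pyGet? grid_map r).bind (fun s => PySem.Str.pyGet? s c)

-- body of A's innermost loop: the if/elif chain on grid_map[r][c]
def pvStepA (grid_map : List String) (rows cols storm r : Int)
    (BAD : PySem.Set (Int × Int)) (c : Int) : PySem.Set (Int × Int) :=
  if pvCell grid_map r c = some '>' then
    PySem.Set.add BAD (r, 1 + PySem.Int.mod (c - 1 + storm) (cols - 2))
  else if pvCell grid_map r c = some 'v' then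
    PySem.Set.add BAD (1 + PySem.Int.mod (r - 1 + storm) (rows - 2), c)
  else if pvCell grid_map r c = some '<' then
    PySem.Set.add BAD (r, 1 + PySem.Int.mod (c - 1 - storm) (cols - 2))
  else if pvCell grid_map r c = some '^' then
    PySem.Set.add BAD (1 + PySem.Int.mod (r - 1 - storm) (rows - 2), c)
  else BAD

def calculate_bad_cells (grid_map : List String) (rows : Int) (cols : Int) : List (Int × List (Int × Int)) :=
  ((PySem.List.pyRange 0 ((rows - 2) * (cols - 2) + 1) 1).foldl (fun BAD_CELLS storm =>
      PySem.Dict.insert BAD_CELLS storm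
        ((PySem.List.pyRange 0 rows 1).foldl (fun BAD r =>
            (PySem.List.pyRange 0 cols 1).foldl (pvStepA grid_map rows cols storm r) BAD)
          PySem.Set.empty))
    PySem.Dict.empty).items

-- ===== PORT B =====
-- one pass over the cells the grid actually has (bounded by rows × cols), collecting every blizzard as (r, c, ch);
-- indexing is via pyGetD, exact here because the indices stay below the min bounds
def pvBlizzards (grid_map : List String) (rows cols : Int) : List (Int × Int × Char) :=
  (PySem.List.pyRange 0 (min rows (grid_map.length : Int)) 1).foldl (fun acc r =>
    let row := PySem.List.pyGetD grid_map r ""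
    (PySem.List.pyRange 0 (min cols (row.toList.length : Int)) 1).foldl (fun acc c =>
      let ch := PySem.List.pyGetD row.toList c ' '
      if ch = '>' ∨ ch = '<' ∨ ch = 'v' ∨ ch = '^' then acc ++ [(r, c, ch)] else acc) acc) []

-- body of B's per-blizzard loop
def pvStepB (rows cols storm : Int) (BAD : PySem.Set (Int × Int))
    (t : Int × Int × Char) : PySem.Set (Int × Int) :=
  if t.2.2 = '>' then PySem.Set.add BAD (t.1, 1 + PySem.Int.mod (t.2.1 - 1 + storm) (cols - 2))
  else if t.2.2 = 'v' then PySem.Set.add BAD (1 + PySem.Int.mod (t.1 - 1 + storm) (rows - 2), t.2.1)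
  else if t.2.2 = '<' then PySem.Set.add BAD (t.1, 1 + PySem.Int.mod (t.2.1 - 1 - storm) (cols - 2))
  else PySem.Set.add BAD (1 + PySem.Int.mod (t.1 - 1 - storm) (rows - 2), t.2.1)

def calculate_bad_cells_alt (grid_map : List String) (rows : Int) (cols : Int) : List (Int × List (Int × Int)) :=
  let blizzards := pvBlizzards grid_map rows cols
  ((PySem.List.pyRange 0 ((rows - 2) * (cols - 2) + 1) 1).foldl (fun BAD_CELLS storm =>
      PySem.Dict.insert BAD_CELLS storm (blizzards.foldl (pvStepB rows cols storm) PySem.Set.empty))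
    PySem.Dict.empty).items

-- ===== PRECONDITION & SPEC =====
-- Pre_ excludes exactly the inputs on which Python A raises: an IndexError when A actually scans the grid
-- (at least one time step, rows > 0, cols > 0) but the grid has fewer than rows×cols cells, and a
-- ZeroDivisionError when cols = 2 with a '>'/'<' blizzard (resp. rows = 2 with 'v'/'^') in the scanned region.
def Pre_calculate_bad_cells (grid_map : List String) (rows : Int) (cols : Int) : Prop :=
  (0 < (rows - 2) * (cols - 2) + 1 → 0 < rows → 0 < cols →
    rows ≤ (grid_map.length : Int) ∧ ∀ s ∈ grid_map.take rows.toNat, cols ≤ (s.toList.length : Int)) ∧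
  (cols = 2 → ∀ s ∈ grid_map.take rows.toNat, ∀ ch ∈ s.toList.take cols.toNat, ch ≠ '>' ∧ ch ≠ '<') ∧
  (rows = 2 → ∀ s ∈ grid_map.take rows.toNat, ∀ ch ∈ s.toList.take cols.toNat, ch ≠ 'v' ∧ ch ≠ '^')
instance (grid_map : List String) (rows : Int) (cols : Int) : Decidable (Pre_calculate_bad_cells grid_map rows cols) := by unfold Pre_calculate_bad_cells; exact instDecidableAnd

def pvWitness_calculate_bad_cells : List String × Int × Int := (["#.#", ".>.", "#.#"], 3, 3)

def Spec_calculate_bad_cells (grid_map : List String) (rows : Int) (cols : Int) (out : List (Int × List (Int × Int))) : Prop := out = calculate_bad_cells_alt grid_map rows cols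
instance (grid_map : List String) (rows : Int) (cols : Int) (out : List (Int × List (Int × Int))) : Decidable (Spec_calculate_bad_cells grid_map rows cols out) := by unfold Spec_calculate_bad_cells; infer_instance

-- ===== CLAIM (what is proved, stated in full; the proofs are below) =====
def Claim_equal_calculate_bad_cells : Prop := ∀ (grid_map : List String) (rows : Int) (cols : Int), Dom_calculate_bad_cells grid_map rows cols → Pre_calculate_bad_cells grid_map rows cols → Spec_calculate_bad_cells grid_map rows cols (calculate_bad_cells grid_map rows cols)

-- ===== LEMMAS AND PROOFS =====

-- the contribution of cell (r, c) to the blizzard index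
def pvContrib (grid_map : List String) (r c : Int) : List (Int × Int × Char) :=
  match pvCell grid_map r c with
  | some ch => if ch = '>' ∨ ch = '<' ∨ ch = 'v' ∨ ch = '^' then [(r, c, ch)] else []
  | none => []

lemma pv_step_single (grid_map : List String) (rows cols storm r c : Int) (s : PySem.Set (Int × Int)) :
    (pvContrib grid_map r c).foldl (pvStepB rows cols storm) s = pvStepA grid_map rows cols storm r s c := by
  unfold pvContrib pvStepA
  rcases h : pvCell grid_map r c with _ | ch
  · simp
  · by_cases h1 : ch = '>'
    · simp [h1, pvStepB]
    · by_cases h2 : ch = '<'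
      · simp [h2, pvStepB]
      · by_cases h3 : ch = 'v'
        · simp [h3, pvStepB]
        · by_cases h4 : ch = '^'
          · simp [h4, pvStepB]
          · simp [h1, h2, h3, h4]

lemma pv_fold_flat (grid_map : List String) (rows cols storm r : Int) :
    ∀ (cs : List Int) (s : PySem.Set (Int × Int)),
    (cs.flatMap (pvContrib grid_map r)).foldl (pvStepB rows cols storm) s
      = cs.foldl (pvStepA grid_map rows cols storm r) s := by
  intro cs
  induction cs with
  | nil => simp
  | cons c cs ih =>
    intro s
    simp only [List.flatMap_cons, List.foldl_append, List.foldl_cons, ih, pv_step_single]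

lemma pv_fold_flat_rows (grid_map : List String) (rows cols storm : Int) (cs : List Int) :
    ∀ (rs : List Int) (s : PySem.Set (Int × Int)),
    (rs.flatMap (fun r => cs.flatMap (pvContrib grid_map r))).foldl (pvStepB rows cols storm) s
      = rs.foldl (fun BAD r => cs.foldl (pvStepA grid_map rows cols storm r) BAD) s := by
  intro rs
  induction rs with
  | nil => simp
  | cons r rs ih =>
    intro s
    simp only [List.flatMap_cons, List.foldl_append, List.foldl_cons, ih, pv_fold_flat]

-- B's inner collection loop over a row whose cells are all in range equals the flatMap of pvContrib
lemma pv_blizz_row (grid_map : List String) (r : Int) (row : String)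
    (hrow : PySem.List.pyGet? grid_map r = some row) :
    ∀ (cs : List Int) (acc : List (Int × Int × Char)),
    (∀ c ∈ cs, 0 ≤ c ∧ c < (row.toList.length : Int)) →
    cs.foldl (fun acc c =>
        let ch := PySem.List.pyGetD row.toList c ' '
        if ch = '>' ∨ ch = '<' ∨ ch = 'v' ∨ ch = '^' then acc ++ [(r, c, ch)] else acc) acc
      = acc ++ cs.flatMap (pvContrib grid_map r) := by
  intro cs
  induction cs with
  | nil => simp
  | cons c cs ih =>
    intro acc hb
    obtain ⟨h0, h1⟩ := hb c (by simp)
    have hch : PySem.List.pyGet? row.toList c = some (PySem.List.pyGetD row.toList c ' ') := by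
      rw [PySem.List.pyGetD_eq_getElem row.toList ' ' h0 h1]
      exact PySem.List.pyGet?_eq_some_getElem row.toList h0 h1
    have hcell : pvCell grid_map r c = some (PySem.List.pyGetD row.toList c ' ') := by
      simp [pvCell, hrow, PySem.Str.pyGet?, hch]
    have hstep : (let ch := PySem.List.pyGetD row.toList c ' '
        if ch = '>' ∨ ch = '<' ∨ ch = 'v' ∨ ch = '^' then acc ++ [(r, c, ch)] else acc)
        = acc ++ pvContrib grid_map r c := by
      simp only [pvContrib, hcell]
      by_cases hc : (PySem.List.pyGetD row.toList c ' ') = '>' ∨ (PySem.List.pyGetD row.toList c ' ') = '<'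
          ∨ (PySem.List.pyGetD row.toList c ' ') = 'v' ∨ (PySem.List.pyGetD row.toList c ' ') = '^'
      · simp [hc]
      · simp [hc]
    simp only [List.foldl_cons, List.flatMap_cons, hstep]
    rw [ih (acc ++ pvContrib grid_map r c) (fun c hc => hb c (by simp [hc])), List.append_assoc]

-- the collected blizzard index is exactly the flatMap over A's scan order, wherever A does not raise
lemma pv_blizzards_eq (grid_map : List String) (rows cols : Int)
    (H : rows ≤ 0 ∨ cols ≤ 0 ∨
      (rows ≤ (grid_map.length : Int) ∧ ∀ s ∈ grid_map.take rows.toNat, cols ≤ (s.toList.length : Int))) :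
    pvBlizzards grid_map rows cols
      = (PySem.List.pyRange 0 rows 1).flatMap (fun r => (PySem.List.pyRange 0 cols 1).flatMap (pvContrib grid_map r)) := by
  rcases H with hr | hc | ⟨hlen, hrows⟩
  · -- no rows are scanned on either side
    unfold pvBlizzards
    rw [PySem.List.pyRange_one_eq_nil (le_trans (min_le_left rows _) hr),
        PySem.List.pyRange_one_eq_nil (b := rows) hr]
    simp
  · -- every row contributes nothing on either side
    unfold pvBlizzards
    have h1 : ∀ r : Int, PySem.List.pyRange 0 (min cols (((PySem.List.pyGetD grid_map r "").toList.length : Int))) 1 = [] :=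
      fun r => PySem.List.pyRange_one_eq_nil (le_trans (min_le_left cols _) hc)
    simp only [h1, List.foldl_nil, PySem.List.foldl_ignore]
    have h2 : ∀ r : Int, (PySem.List.pyRange 0 cols 1).flatMap (pvContrib grid_map r) = [] := by
      intro r; rw [PySem.List.pyRange_one_eq_nil (b := cols) hc]; rfl
    simp [h2]
  · -- the grid really has rows × cols cells: both sides scan the same cells
    unfold pvBlizzards
    have hmin : min rows (grid_map.length : Int) = rows := min_eq_left hlen
    rw [hmin]
    have key : ∀ (rs : List Int) (acc : List (Int × Int × Char)),
        (∀ r ∈ rs, 0 ≤ r ∧ r < rows) →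
        rs.foldl (fun acc r =>
            let row := PySem.List.pyGetD grid_map r ""
            (PySem.List.pyRange 0 (min cols ((row.toList.length : Int))) 1).foldl (fun acc c =>
              let ch := PySem.List.pyGetD row.toList c ' '
              if ch = '>' ∨ ch = '<' ∨ ch = 'v' ∨ ch = '^' then acc ++ [(r, c, ch)] else acc) acc) acc
          = acc ++ rs.flatMap (fun r => (PySem.List.pyRange 0 cols 1).flatMap (pvContrib grid_map r)) := by
      intro rs
      induction rs with
      | nil => simp
      | cons r rs ih =>
        intro acc hb
        obtain ⟨hr0, hr1⟩ := hb r (by simp)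
        have hrlen : r < (grid_map.length : Int) := lt_of_lt_of_le hr1 hlen
        have hget : PySem.List.pyGet? grid_map r = some (PySem.List.pyGetD grid_map r "") := by
          rw [PySem.List.pyGetD_eq_getElem grid_map "" hr0 hrlen]
          exact PySem.List.pyGet?_eq_some_getElem grid_map hr0 hrlen
        have hmem : PySem.List.pyGetD grid_map r "" ∈ grid_map.take rows.toNat := by
          rw [PySem.List.pyGetD_eq_getElem grid_map "" hr0 hrlen]
          have hlt : r.toNat < (grid_map.take rows.toNat).length := by
            simp only [List.length_take]
            omega
          have := List.getElem_take (xs := grid_map) (i := r.toNat) (j := rows.toNat)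
            (h := hlt)
          exact this ▸ List.getElem_mem hlt
        have hclen : cols ≤ ((PySem.List.pyGetD grid_map r "").toList.length : Int) := hrows _ hmem
        have hminc : min cols ((PySem.List.pyGetD grid_map r "").toList.length : Int) = cols := min_eq_left hclen
        simp only [List.foldl_cons, List.flatMap_cons, hminc]
        rw [pv_blizz_row grid_map r (PySem.List.pyGetD grid_map r "") hget _ acc
            (fun c hc => by
              have := PySem.List.mem_pyRange_one.mp hc
              exact ⟨this.1, lt_of_lt_of_le this.2 hclen⟩)]
        rw [ih _ (fun r hr => hb r (by simp [hr])), List.append_assoc]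
    exact key (PySem.List.pyRange 0 rows 1) []
      (fun r hr => PySem.List.mem_pyRange_one.mp hr)

lemma pv_inner_eq (grid_map : List String) (rows cols storm : Int)
    (H : rows ≤ 0 ∨ cols ≤ 0 ∨
      (rows ≤ (grid_map.length : Int) ∧ ∀ s ∈ grid_map.take rows.toNat, cols ≤ (s.toList.length : Int))) :
    (pvBlizzards grid_map rows cols).foldl (pvStepB rows cols storm) PySem.Set.empty
      = (PySem.List.pyRange 0 rows 1).foldl (fun BAD r =>
          (PySem.List.pyRange 0 cols 1).foldl (pvStepA grid_map rows cols storm r) BAD) PySem.Set.empty := by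
  rw [pv_blizzards_eq grid_map rows cols H, pv_fold_flat_rows]

-- ===== VERDICT (by name: the statement is the Claim_ definition above) =====
theorem calculate_bad_cells_spec : Claim_equal_calculate_bad_cells := by
  intro grid_map rows cols _ hpre
  unfold Spec_calculate_bad_cells calculate_bad_cells calculate_bad_cells_alt
  simp only []
  by_cases hS : (rows - 2) * (cols - 2) + 1 ≤ 0
  · rw [PySem.List.pyRange_one_eq_nil (b := (rows - 2) * (cols - 2) + 1) (by omega)]
    rfl
  · have H : rows ≤ 0 ∨ cols ≤ 0 ∨
        (rows ≤ (grid_map.length : Int) ∧ ∀ s ∈ grid_map.take rows.toNat, cols ≤ (s.toList.length : Int)) := by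
      by_cases hr : rows ≤ 0
      · exact Or.inl hr
      · by_cases hc : cols ≤ 0
        · exact Or.inr (Or.inl hc)
        · exact Or.inr (Or.inr (hpre.1 (by omega) (by omega) (by omega)))
    congr 1
    exact PySem.List.foldl_congr_mem _ _ _ _
      (fun BC storm _ => by rw [pv_inner_eq grid_map rows cols storm H])
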